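-- pv_equiv track=rewrite | github.com/Dai2137/AtCoder | AHC/52/main.py | build_cell_walls
-- ===== SOURCE A (Python) =====
-- def build_cell_walls(v, h, N):
--     """
--     v[i][j] = マス(i,j)と(i,j+1)の間の壁 (長さN-1)
--     h[i][j] = マス(i,j)と(i+1,j)の間の壁 (長さN)
--     N = グリッドのサイズ (N×N)
--     """
--     cell_walls = [[{"U":False,"D":False,"L":False,"R":False} for _ in range(N)] for _ in range(N)]
--
--     for i in range(N):
--         for j in range(N):
--             # 左端・右端・上端・下端 → 枠外は壁とみなす
--             if j == 0:
--                 cell_walls[i][j]["L"] = True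
--             if j == N-1:
--                 cell_walls[i][j]["R"] = True
--             if i == 0:
--                 cell_walls[i][j]["U"] = True
--             if i == N-1:
--                 cell_walls[i][j]["D"] = True
--
--             # v: 左右の壁
--             if j < N-1 and v[i][j] == '1':
--                 cell_walls[i][j]["R"] = True
--                 cell_walls[i][j+1]["L"] = True
--
--             # h: 上下の壁
--             if i < N-1 and h[i][j] == '1':
--                 cell_walls[i][j]["D"] = True
--                 cell_walls[i+1][j]["U"] = True
--
--     return cell_walls
-- ===== SOURCE B (Python) =====
-- def build_cell_walls(v, h, N):
--     """Gather form: each cell's four walls are computed locally from the edge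
--     arrays (no cross-cell writes)."""
--     def cell(i, j):
--         return {"U": i == 0 or h[i-1][j] == '1',
--                 "D": i == N-1 or h[i][j] == '1',
--                 "L": j == 0 or v[i][j-1] == '1',
--                 "R": j == N-1 or v[i][j] == '1'}
--     return [[cell(i, j) for j in range(N)] for i in range(N)]
-- ===== Notes on version B (the rewrite author's own statement) =====
-- stated objective: simpler
-- what changed: Replaced the scatter-style loop that mutates neighbour cells' dicts (writes to (i,j+1) and (i+1,j)) with a pure gather: each cell's four wall flags are computed locally from the edge arrays in one dict expression.
import Mathlib
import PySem

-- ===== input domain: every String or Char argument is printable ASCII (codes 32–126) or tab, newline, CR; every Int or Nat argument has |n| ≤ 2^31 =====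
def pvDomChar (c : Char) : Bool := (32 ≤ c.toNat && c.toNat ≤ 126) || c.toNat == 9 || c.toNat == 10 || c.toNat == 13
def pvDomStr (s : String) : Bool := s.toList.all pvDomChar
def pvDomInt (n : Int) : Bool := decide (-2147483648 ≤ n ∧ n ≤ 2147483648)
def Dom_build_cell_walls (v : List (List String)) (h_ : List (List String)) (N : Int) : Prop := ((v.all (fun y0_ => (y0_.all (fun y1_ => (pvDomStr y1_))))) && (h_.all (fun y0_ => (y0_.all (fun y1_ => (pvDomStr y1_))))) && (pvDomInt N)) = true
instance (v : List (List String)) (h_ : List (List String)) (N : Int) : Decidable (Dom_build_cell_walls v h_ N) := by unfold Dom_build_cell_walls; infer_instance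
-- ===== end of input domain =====

-- B replaces A's scatter loop (which also writes into neighbour cells (i,j+1) and (i+1,j))
-- by a pure per-cell gather computing each cell's four wall flags locally; return values only
-- (neither program mutates its arguments).

-- ===== PORT A =====
-- shared 2-D read helper: xs[i][j]; Pre_ guarantees every read A performs is in range,
-- so the default "" is never the value actually used
def pvGet2 (xs : List (List String)) (i j : Int) : String :=
  (xs.getD i.toNat []).getD j.toNat ""

-- dict key assignment d[k] = true; the cell dicts have the four distinct keys U,D,L,R
def pvDset (d : List (String × Bool)) (k : String) : List (String × Bool) :=
  d.map (fun p => if p.1 == k then (p.1, true) else p)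

-- cell_walls[i][j][k] = True
def pvSet (g : List (List (List (String × Bool)))) (i j : Int) (k : String) :
    List (List (List (String × Bool))) :=
  g.set i.toNat ((g.getD i.toNat []).set j.toNat
    (pvDset ((g.getD i.toNat []).getD j.toNat []) k))

def build_cell_walls (v : List (List String)) (h_ : List (List String)) (N : Int) :
    List (List (List (String × Bool))) :=
  let init := (PySem.List.pyRange 0 N 1).map (fun _ =>
    (PySem.List.pyRange 0 N 1).map (fun _ =>
      [("U", false), ("D", false), ("L", false), ("R", false)]))
  (PySem.List.pyRange 0 N 1).foldl (fun g i =>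
    (PySem.List.pyRange 0 N 1).foldl (fun g j =>
      let g := if j = 0 then pvSet g i j "L" else g
      let g := if j = N - 1 then pvSet g i j "R" else g
      let g := if i = 0 then pvSet g i j "U" else g
      let g := if i = N - 1 then pvSet g i j "D" else g
      let g := if j < N - 1 ∧ pvGet2 v i j = "1" then pvSet (pvSet g i j "R") i (j+1) "L" else g
      let g := if i < N - 1 ∧ pvGet2 h_ i j = "1" then pvSet (pvSet g i j "D") (i+1) j "U" else g
      g) g) init

-- ===== PORT B =====
def pvCellB (v : List (List String)) (h_ : List (List String)) (N i j : Int) :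
    List (String × Bool) :=
  [("U", decide (i = 0) || decide (pvGet2 h_ (i-1) j = "1")),
   ("D", decide (i = N-1) || decide (pvGet2 h_ i j = "1")),
   ("L", decide (j = 0) || decide (pvGet2 v i (j-1) = "1")),
   ("R", decide (j = N-1) || decide (pvGet2 v i j = "1"))]

def build_cell_walls_alt (v : List (List String)) (h_ : List (List String)) (N : Int) :
    List (List (List (String × Bool))) :=
  (PySem.List.pyRange 0 N 1).map (fun i =>
    (PySem.List.pyRange 0 N 1).map (fun j => pvCellB v h_ N i j))

-- ===== PRECONDITION & SPEC =====
-- Exactly the inputs on which the Python A returns (for N ≥ 2 it reads v[i][j] for all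
-- i < N, j < N-1 and h[i][j] for i < N-1, j < N; for N ≤ 1 it reads neither array).
def Pre_build_cell_walls (v : List (List String)) (h_ : List (List String)) (N : Int) : Prop :=
  N ≤ 1 ∨
    (N ≤ (v.length : Int) ∧ (∀ i : Nat, i < N.toNat → N - 1 ≤ ((v.getD i []).length : Int)) ∧
     N - 1 ≤ (h_.length : Int) ∧ (∀ i : Nat, i < (N-1).toNat → N ≤ ((h_.getD i []).length : Int)))
instance (v : List (List String)) (h_ : List (List String)) (N : Int) : Decidable (Pre_build_cell_walls v h_ N) := by unfold Pre_build_cell_walls; infer_instance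

def pvWitness_build_cell_walls : List (List String) × List (List String) × Int :=
  ([["0"], ["1"]], [["1", "0"]], 2)

def Spec_build_cell_walls (v : List (List String)) (h_ : List (List String)) (N : Int) (out : List (List (List (String × Bool)))) : Prop := out = build_cell_walls_alt v h_ N
instance (v : List (List String)) (h_ : List (List String)) (N : Int) (out : List (List (List (String × Bool)))) : Decidable (Spec_build_cell_walls v h_ N out) := by unfold Spec_build_cell_walls; infer_instance

-- ===== CLAIM (what is proved, stated in full; the proofs are below) =====
def Claim_equal_build_cell_walls : Prop := ∀ (v : List (List String)) (h_ : List (List String)) (N : Int), Dom_build_cell_walls v h_ N → Pre_build_cell_walls v h_ N → Spec_build_cell_walls v h_ N (build_cell_walls v h_ N)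

-- ===== LEMMAS AND PROOFS =====

-- the state of cell (a,b) after A has processed all iterations lexicographically before (i,j)
def cellAt (v h_ : List (List String)) (n i j a b : Nat) : List (String × Bool) :=
  if a < i ∨ (a = i ∧ b < j) then
    [("U", decide (a = 0) || decide ((h_.getD (a-1) []).getD b "" = "1")),
     ("D", decide (a = n-1) || decide ((h_.getD a []).getD b "" = "1")),
     ("L", decide (b = 0) || decide ((v.getD a []).getD (b-1) "" = "1")),
     ("R", decide (b = n-1) || decide ((v.getD a []).getD b "" = "1"))]
  else
    -- not yet processed: only a neighbour iteration may have set U or L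
    [("U", decide (0 < a ∧ (a-1 < i ∨ (a-1 = i ∧ b < j)) ∧ (h_.getD (a-1) []).getD b "" = "1")),
     ("D", false),
     ("L", decide (0 < b ∧ (a < i ∨ (a = i ∧ b-1 < j)) ∧ (v.getD a []).getD (b-1) "" = "1")),
     ("R", false)]

def gridOf (f : Nat → Nat → List (String × Bool)) (n : Nat) : List (List (List (String × Bool))) :=
  (List.range n).map (fun a => (List.range n).map (fun b => f a b))

lemma pvSet_gridOf (f : Nat → Nat → List (String × Bool)) (n i j : Nat)
    (hi : i < n) (hj : j < n) (k : String) :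
    pvSet (gridOf f n) (i : Int) (j : Int) k
      = gridOf (fun a b => if a = i ∧ b = j then pvDset (f i j) k else f a b) n := by
  unfold pvSet gridOf
  have hrow : (((List.range n).map (fun a => (List.range n).map (fun b => f a b))).getD
      (Int.toNat i) []) = (List.range n).map (fun b => f i b) := by
    rw [List.getD_eq_getElem _ _ (by simpa using hi)]; simp
  have hcell : (((List.range n).map (fun b => f i b)).getD (Int.toNat j) []) = f i j := by
    rw [List.getD_eq_getElem _ _ (by simpa using hj)]; simp
  simp only [Int.toNat_natCast] at *
  rw [hrow, hcell]
  apply List.ext_getElem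
  · simp
  intro a ha1 ha2
  simp only [List.getElem_set, List.getElem_map, List.getElem_range] at *
  by_cases hai : i = a
  · subst hai
    apply List.ext_getElem
    · simp
    intro b hb1 hb2
    simp only [List.getElem_map, List.getElem_range] at *
    by_cases hbj : j = b
    · subst hbj; simp
    · have hbj' : ¬ (b = j) := fun h => hbj h.symm
      simp [hbj, hbj']
  · simp only [if_neg hai]
    apply List.map_congr_left
    intro b _
    have : ¬ (a = i ∧ b = j) := fun h => hai h.1.symm
    simp [this]

lemma gridOf_congr (f g : Nat → Nat → List (String × Bool)) (n : Nat)
    (h : ∀ a b, a < n → b < n → f a b = g a b) : gridOf f n = gridOf g n := by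
  unfold gridOf
  apply List.map_congr_left
  intro a ha
  apply List.map_congr_left
  intro b hb
  exact h a b (List.mem_range.mp ha) (List.mem_range.mp hb)

lemma ite_pvSet (c : Prop) [Decidable c] (f : Nat → Nat → List (String × Bool)) (n i j : Nat)
    (k : String) (hb : c → i < n ∧ j < n) :
    (if c then pvSet (gridOf f n) (i : Int) (j : Int) k else gridOf f n)
      = gridOf (fun a b => if c ∧ a = i ∧ b = j then pvDset (f i j) k else f a b) n := by
  by_cases hc : c
  · rw [if_pos hc, pvSet_gridOf f n i j (hb hc).1 (hb hc).2 k]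
    have : (fun a b => if c ∧ a = i ∧ b = j then pvDset (f i j) k else f a b)
        = (fun a b => if a = i ∧ b = j then pvDset (f i j) k else f a b) := by
      funext a b; simp [hc]
    rw [this]
  · rw [if_neg hc]
    have : (fun a b => if c ∧ a = i ∧ b = j then pvDset (f i j) k else f a b) = f := by
      funext a b; simp [hc]
    rw [this]

lemma ite_pvSet2 (c : Prop) [Decidable c] (f : Nat → Nat → List (String × Bool))
    (n i1 j1 i2 j2 : Nat) (k1 k2 : String)
    (hb : c → i1 < n ∧ j1 < n ∧ i2 < n ∧ j2 < n) (hne : ¬(i2 = i1 ∧ j2 = j1)) :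
    (if c then pvSet (pvSet (gridOf f n) (i1 : Int) (j1 : Int) k1) (i2 : Int) (j2 : Int) k2
     else gridOf f n)
      = gridOf (fun a b =>
          if c ∧ a = i1 ∧ b = j1 then pvDset (f i1 j1) k1
          else if c ∧ a = i2 ∧ b = j2 then pvDset (f i2 j2) k2
          else f a b) n := by
  by_cases hc : c
  · obtain ⟨h1, h2, h3, h4⟩ := hb hc
    rw [if_pos hc, pvSet_gridOf f n i1 j1 h1 h2 k1,
        pvSet_gridOf _ n i2 j2 h3 h4 k2]
    have : (fun a b =>
          if c ∧ a = i1 ∧ b = j1 then pvDset (f i1 j1) k1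
          else if c ∧ a = i2 ∧ b = j2 then pvDset (f i2 j2) k2
          else f a b)
        = (fun a b => if a = i2 ∧ b = j2 then
            pvDset (if i2 = i1 ∧ j2 = j1 then pvDset (f i1 j1) k1 else f i2 j2) k2
          else if a = i1 ∧ b = j1 then pvDset (f i1 j1) k1 else f a b) := by
      funext a b
      by_cases e2 : a = i2 ∧ b = j2
      · have : ¬ (a = i1 ∧ b = j1) := by
          rintro ⟨x, y⟩; exact hne ⟨by omega, by omega⟩
        simp [e2, hne, hc]
      · by_cases e1 : a = i1 ∧ b = j1
        · have hx : ¬ (i1 = i2 ∧ j1 = j2) := by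
            rintro ⟨x, y⟩; exact e2 ⟨by omega, by omega⟩
          simp [e1, hc]
          intro x y
          exact absurd ⟨x, y⟩ hx
        · simp [e1, e2, hc]
    rw [this]
  · rw [if_neg hc]
    have : (fun a b =>
          if c ∧ a = i1 ∧ b = j1 then pvDset (f i1 j1) k1
          else if c ∧ a = i2 ∧ b = j2 then pvDset (f i2 j2) k2
          else f a b) = f := by
      funext a b; simp [hc]
    rw [this]

-- one inner-loop iteration advances the state from (i,j) to (i,j+1)
set_option maxHeartbeats 40000000 in
lemma step_lemma (v h_ : List (List String)) (n i j : Nat) (hi : i < n) (hj : j < n) :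
    (let g := gridOf (cellAt v h_ n i j) n
     let g := if (j:Int) = 0 then pvSet g i j "L" else g
     let g := if (j:Int) = (n:Int) - 1 then pvSet g i j "R" else g
     let g := if (i:Int) = 0 then pvSet g i j "U" else g
     let g := if (i:Int) = (n:Int) - 1 then pvSet g i j "D" else g
     let g := if (j:Int) < (n:Int) - 1 ∧ pvGet2 v i j = "1" then pvSet (pvSet g i j "R") i ((j:Int)+1) "L" else g
     let g := if (i:Int) < (n:Int) - 1 ∧ pvGet2 h_ i j = "1" then pvSet (pvSet g i j "D") ((i:Int)+1) j "U" else g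
     g) = gridOf (cellAt v h_ n i (j+1)) n := by
  have ej : ((j:Int)) + 1 = ((j+1 : Nat) : Int) := by push_cast; ring
  have ei : ((i:Int)) + 1 = ((i+1 : Nat) : Int) := by push_cast; ring
  dsimp only
  rw [ej, ei]
  rw [ite_pvSet ((j:Int) = 0) _ n i j "L" (fun _ => ⟨hi, hj⟩)]
  rw [ite_pvSet ((j:Int) = (n:Int) - 1) _ n i j "R" (fun _ => ⟨hi, hj⟩)]
  rw [ite_pvSet ((i:Int) = 0) _ n i j "U" (fun _ => ⟨hi, hj⟩)]
  rw [ite_pvSet ((i:Int) = (n:Int) - 1) _ n i j "D" (fun _ => ⟨hi, hj⟩)]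
  rw [ite_pvSet2 ((j:Int) < (n:Int) - 1 ∧ pvGet2 v i j = "1") _ n i j i (j+1) "R" "L"
        (fun hc => ⟨hi, hj, hi, by omega⟩) (by rintro ⟨_, x⟩; omega)]
  rw [ite_pvSet2 ((i:Int) < (n:Int) - 1 ∧ pvGet2 h_ i j = "1") _ n i j (i+1) j "D" "U"
        (fun hc => ⟨hi, hj, by omega, hj⟩) (by rintro ⟨x, _⟩; omega)]
  apply gridOf_congr
  intro a b ha hb
  have hg2v : pvGet2 v (i:Int) (j:Int) = (v.getD i []).getD j "" := by
    simp [pvGet2]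
  have hg2h : pvGet2 h_ (i:Int) (j:Int) = (h_.getD i []).getD j "" := by
    simp [pvGet2]
  have hn1 : ((n:Int)) - 1 = ((n-1:Nat) : Int) := by omega
  simp only [hg2v, hg2h, hn1, Int.natCast_eq_zero, Nat.cast_inj, Nat.cast_lt,
    and_true, true_and]
  by_cases hA : a = i ∧ b = j
  · obtain ⟨rfl, rfl⟩ := hA
    have eOld : cellAt v h_ n a b a b =
        [("U", decide (0 < a ∧ (h_.getD (a-1) []).getD b "" = "1")), ("D", false),
         ("L", decide (0 < b ∧ (v.getD a []).getD (b-1) "" = "1")), ("R", false)] := by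
      unfold cellAt
      rw [if_neg (by omega)]
      have u : decide (0 < a ∧ (a-1 < a ∨ (a-1 = a ∧ b < b)) ∧ (h_.getD (a-1) []).getD b "" = "1")
          = decide (0 < a ∧ (h_.getD (a-1) []).getD b "" = "1") :=
        decide_eq_decide.mpr ⟨fun ⟨x, _, z⟩ => ⟨x, z⟩, fun ⟨x, z⟩ => ⟨x, Or.inl (by omega), z⟩⟩
      have l : decide (0 < b ∧ (a < a ∨ (a = a ∧ b-1 < b)) ∧ (v.getD a []).getD (b-1) "" = "1")
          = decide (0 < b ∧ (v.getD a []).getD (b-1) "" = "1") :=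
        decide_eq_decide.mpr ⟨fun ⟨x, _, z⟩ => ⟨x, z⟩, fun ⟨x, z⟩ => ⟨x, Or.inr ⟨rfl, by omega⟩, z⟩⟩
      rw [u, l]
    have eNew : cellAt v h_ n a (b+1) a b =
        [("U", decide (a = 0) || decide ((h_.getD (a-1) []).getD b "" = "1")),
         ("D", decide (a = n-1) || decide ((h_.getD a []).getD b "" = "1")),
         ("L", decide (b = 0) || decide ((v.getD a []).getD (b-1) "" = "1")),
         ("R", decide (b = n-1) || decide ((v.getD a []).getD b "" = "1"))] := by
      unfold cellAt
      rw [if_pos (by omega)]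
    simp only [and_true, eOld, eNew]
    clear hg2v hg2h hn1 ei ej hi hj eOld eNew
    by_cases p1 : b = 0 <;> by_cases p2 : b = n-1 <;> by_cases p3 : a = 0 <;>
      by_cases p4 : a = n-1 <;> by_cases p5 : b < n-1 <;> by_cases p6 : a < n-1 <;>
      by_cases g2 : (h_.getD a []).getD b "" = "1" <;>
      by_cases g4 : (v.getD a []).getD b "" = "1" <;>
      simp_all [pvDset] <;> omega
  · by_cases hB : a = i ∧ b = j + 1
    · obtain ⟨rfl, rfl⟩ := hB
      have f2 : (a = a + 1 ∧ j + 1 = j) = False := eq_false (by omega)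
      have eOld : cellAt v h_ n a j a (j+1) =
          [("U", decide (0 < a ∧ (h_.getD (a-1) []).getD (j+1) "" = "1")), ("D", false),
           ("L", false), ("R", false)] := by
        unfold cellAt
        rw [if_neg (by omega)]
        have u : decide (0 < a ∧ (a-1 < a ∨ (a-1 = a ∧ j+1 < j)) ∧ (h_.getD (a-1) []).getD (j+1) "" = "1")
            = decide (0 < a ∧ (h_.getD (a-1) []).getD (j+1) "" = "1") :=
          decide_eq_decide.mpr ⟨fun ⟨x, _, z⟩ => ⟨x, z⟩, fun ⟨x, z⟩ => ⟨x, Or.inl (by omega), z⟩⟩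
        have l : decide (0 < j+1 ∧ (a < a ∨ (a = a ∧ j+1-1 < j)) ∧ (v.getD a []).getD (j+1-1) "" = "1")
            = decide False := decide_eq_decide.mpr ⟨fun ⟨_, y, _⟩ => by omega, fun x => x.elim⟩
        rw [u, l, decide_false]
      have eNew : cellAt v h_ n a (j+1) a (j+1) =
          [("U", decide (0 < a ∧ (h_.getD (a-1) []).getD (j+1) "" = "1")), ("D", false),
           ("L", decide ((v.getD a []).getD (j+1-1) "" = "1")), ("R", false)] := by
        unfold cellAt
        rw [if_neg (by omega)]
        have u : decide (0 < a ∧ (a-1 < a ∨ (a-1 = a ∧ j+1 < j+1)) ∧ (h_.getD (a-1) []).getD (j+1) "" = "1")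
            = decide (0 < a ∧ (h_.getD (a-1) []).getD (j+1) "" = "1") :=
          decide_eq_decide.mpr ⟨fun ⟨x, _, z⟩ => ⟨x, z⟩, fun ⟨x, z⟩ => ⟨x, Or.inl (by omega), z⟩⟩
        have l : decide (0 < j+1 ∧ (a < a ∨ (a = a ∧ j+1-1 < j+1)) ∧ (v.getD a []).getD (j+1-1) "" = "1")
            = decide ((v.getD a []).getD (j+1-1) "" = "1") :=
          decide_eq_decide.mpr ⟨fun ⟨_, _, z⟩ => z, fun z => ⟨by omega, Or.inr ⟨rfl, by omega⟩, z⟩⟩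
        rw [u, l]
      simp only [f2, and_true, and_false, if_false, eOld, eNew]
      by_cases g3 : (v.getD a []).getD (j+1-1) "" = "1" <;>
        simp_all [pvDset]
    · by_cases hC : a = i + 1 ∧ b = j
      · obtain ⟨rfl, rfl⟩ := hC
        have f2 : (i + 1 = i ∧ b = b + 1) = False := eq_false (by omega)
        have eOld : cellAt v h_ n i b (i+1) b =
            [("U", false), ("D", false), ("L", false), ("R", false)] := by
          unfold cellAt
          rw [if_neg (by omega)]
          have u : decide (0 < i+1 ∧ (i+1-1 < i ∨ (i+1-1 = i ∧ b < b)) ∧ (h_.getD (i+1-1) []).getD b "" = "1")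
              = decide False := decide_eq_decide.mpr ⟨fun ⟨_, y, _⟩ => by omega, fun x => x.elim⟩
          have l : decide (0 < b ∧ (i+1 < i ∨ (i+1 = i ∧ b-1 < b)) ∧ (v.getD (i+1) []).getD (b-1) "" = "1")
              = decide False := decide_eq_decide.mpr ⟨fun ⟨_, y, _⟩ => by omega, fun x => x.elim⟩
          rw [u, l, decide_false]
        have eNew : cellAt v h_ n i (b+1) (i+1) b =
            [("U", decide ((h_.getD (i+1-1) []).getD b "" = "1")), ("D", false),
             ("L", false), ("R", false)] := by
          unfold cellAt
          rw [if_neg (by omega)]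
          have u : decide (0 < i+1 ∧ (i+1-1 < i ∨ (i+1-1 = i ∧ b < b+1)) ∧ (h_.getD (i+1-1) []).getD b "" = "1")
              = decide ((h_.getD (i+1-1) []).getD b "" = "1") :=
            decide_eq_decide.mpr ⟨fun ⟨_, _, z⟩ => z, fun z => ⟨by omega, Or.inr ⟨by omega, by omega⟩, z⟩⟩
          have l : decide (0 < b ∧ (i+1 < i ∨ (i+1 = i ∧ b-1 < b+1)) ∧ (v.getD (i+1) []).getD (b-1) "" = "1")
              = decide False := decide_eq_decide.mpr ⟨fun ⟨_, y, _⟩ => by omega, fun x => x.elim⟩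
          rw [u, l, decide_false]
        simp only [f2, and_true, and_false, if_false, eOld, eNew]
        by_cases g2 : (h_.getD (i+1-1) []).getD b "" = "1" <;>
          simp_all [pvDset]
      · have nA : (a = i ∧ b = j) = False := eq_false hA
        have nB : (a = i ∧ b = j + 1) = False := eq_false hB
        have nC : (a = i + 1 ∧ b = j) = False := eq_false hC
        simp only [nA, nB, nC, and_false, if_false]
        unfold cellAt
        by_cases hp : a < i ∨ (a = i ∧ b < j)
        · rw [if_pos hp, if_pos (by omega)]
        · rw [if_neg hp, if_neg (by omega)]
          have u : decide (0 < a ∧ (a-1 < i ∨ (a-1 = i ∧ b < j)) ∧ (h_.getD (a-1) []).getD b "" = "1")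
              = decide (0 < a ∧ (a-1 < i ∨ (a-1 = i ∧ b < j+1)) ∧ (h_.getD (a-1) []).getD b "" = "1") :=
            decide_eq_decide.mpr ⟨fun ⟨x, y, z⟩ => ⟨x, by omega, z⟩, fun ⟨x, y, z⟩ => ⟨x, by omega, z⟩⟩
          have l : decide (0 < b ∧ (a < i ∨ (a = i ∧ b-1 < j)) ∧ (v.getD a []).getD (b-1) "" = "1")
              = decide (0 < b ∧ (a < i ∨ (a = i ∧ b-1 < j+1)) ∧ (v.getD a []).getD (b-1) "" = "1") :=
            decide_eq_decide.mpr ⟨fun ⟨x, y, z⟩ => ⟨x, by omega, z⟩, fun ⟨x, y, z⟩ => ⟨x, by omega, z⟩⟩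
          rw [u, l]

lemma foldl_inv {α : Type} (f : α → Nat → α) (P : Nat → α) :
    ∀ (m j : Nat), (∀ k, j ≤ k → k < j + m → f (P k) k = P (k+1)) →
      (List.range' j m).foldl f (P j) = P (j + m)
  | 0, j, _ => by simp
  | (m+1), j, hstep => by
      rw [List.range'_succ, List.foldl_cons, hstep j (le_refl j) (by omega)]
      have e : j + (m+1) = (j+1) + m := by omega
      rw [e]
      exact foldl_inv f P m (j+1) (fun k hk1 hk2 => hstep k (by omega) (by omega))

lemma cellAt_zero (v h_ : List (List String)) (n a b : Nat) :
    cellAt v h_ n 0 0 a b = [("U", false), ("D", false), ("L", false), ("R", false)] := by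
  unfold cellAt
  rw [if_neg (by omega)]
  have u : decide (0 < a ∧ (a-1 < 0 ∨ (a-1 = 0 ∧ b < 0)) ∧ (h_.getD (a-1) []).getD b "" = "1")
      = decide False :=
    decide_eq_decide.mpr ⟨fun ⟨_, y, _⟩ => y.elim (fun h => by omega) (fun h => by omega),
      fun x => x.elim⟩
  have l : decide (0 < b ∧ (a < 0 ∨ (a = 0 ∧ b-1 < 0)) ∧ (v.getD a []).getD (b-1) "" = "1")
      = decide False :=
    decide_eq_decide.mpr ⟨fun ⟨_, y, _⟩ => y.elim (fun h => by omega) (fun h => by omega),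
      fun x => x.elim⟩
  rw [u, l, decide_false]

lemma rowEnd (v h_ : List (List String)) (n i : Nat) :
    gridOf (cellAt v h_ n i n) n = gridOf (cellAt v h_ n (i+1) 0) n := by
  apply gridOf_congr
  intro a b ha hb
  unfold cellAt
  by_cases hp : a < i ∨ (a = i ∧ b < n)
  · rw [if_pos hp, if_pos (by omega)]
  · rw [if_neg hp, if_neg (by omega)]
    have u : decide (0 < a ∧ (a-1 < i ∨ (a-1 = i ∧ b < n)) ∧ (h_.getD (a-1) []).getD b "" = "1")
        = decide (0 < a ∧ (a-1 < i+1 ∨ (a-1 = i+1 ∧ b < 0)) ∧ (h_.getD (a-1) []).getD b "" = "1") :=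
      decide_eq_decide.mpr ⟨fun ⟨x, y, z⟩ => ⟨x, by omega, z⟩, fun ⟨x, y, z⟩ => ⟨x, by omega, z⟩⟩
    have l : decide (0 < b ∧ (a < i ∨ (a = i ∧ b-1 < n)) ∧ (v.getD a []).getD (b-1) "" = "1")
        = decide (0 < b ∧ (a < i+1 ∨ (a = i+1 ∧ b-1 < 0)) ∧ (v.getD a []).getD (b-1) "" = "1") :=
      decide_eq_decide.mpr ⟨fun ⟨x, y, z⟩ => ⟨x, by omega, z⟩, fun ⟨x, y, z⟩ => ⟨x, by omega, z⟩⟩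
    rw [u, l]

lemma cell_final (v h_ : List (List String)) (n a b : Nat) (ha : a < n) (hb : b < n) :
    cellAt v h_ n n 0 a b = pvCellB v h_ (n : Int) (a : Int) (b : Int) := by
  unfold cellAt pvCellB pvGet2
  rw [if_pos (by omega)]
  have e1 : ((a:Int) - 1).toNat = a - 1 := by omega
  have e2 : ((a:Int)).toNat = a := by omega
  have e3 : ((b:Int) - 1).toNat = b - 1 := by omega
  have e4 : ((b:Int)).toNat = b := by omega
  have e5 : ((a:Int) = 0) = (a = 0) := by simp
  have e6 : ((b:Int) = 0) = (b = 0) := by simp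
  have e7 : ((a:Int) = (n:Int) - 1) = (a = n-1) := propext (by omega)
  have e8 : ((b:Int) = (n:Int) - 1) = (b = n-1) := propext (by omega)
  simp only [e1, e2, e3, e4, e5, e6, e7, e8]

theorem main_eq (v h_ : List (List String)) (N : Int) :
    build_cell_walls v h_ N = build_cell_walls_alt v h_ N := by
  unfold build_cell_walls build_cell_walls_alt
  by_cases hN : N ≤ 0
  · have hz : PySem.List.pyRange 0 N 1 = [] := by
      rw [PySem.List.pyRange_one]
      have : (N - 0).toNat = 0 := by omega
      rw [this]
      rfl
    simp [hz]
  · have hN2 : 0 < N := by omega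
    obtain ⟨n, rfl⟩ : ∃ n : Nat, N = (n : Int) := ⟨N.toNat, (Int.toNat_of_nonneg hN2.le).symm⟩
    have hr : PySem.List.pyRange 0 (n:Int) 1 = List.map (fun k : Nat => (k : Int)) (List.range n) := by
      rw [PySem.List.pyRange_one]
      have : ((n:Int) - 0).toNat = n := by omega
      rw [this]
      apply List.map_congr_left
      intro k _
      omega
    rw [hr]
    simp only [List.foldl_map]
    have hinit : (List.map (fun k : Nat => (k : Int)) (List.range n)).map (fun _ =>
        (List.map (fun k : Nat => (k : Int)) (List.range n)).map (fun _ =>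
          [("U", false), ("D", false), ("L", false), ("R", false)]))
        = gridOf (cellAt v h_ n 0 0) n := by
      unfold gridOf
      rw [List.map_map, List.map_map]
      apply List.map_congr_left
      intro a _
      simp only [Function.comp]
      apply List.map_congr_left
      intro b _
      exact (cellAt_zero v h_ n a b).symm
    rw [hinit]
    have hfin : gridOf (cellAt v h_ n n 0) n
        = (List.map (fun k : Nat => (k : Int)) (List.range n)).map (fun i =>
            (List.map (fun k : Nat => (k : Int)) (List.range n)).map (fun j => pvCellB v h_ (n:Int) i j)) := by
      unfold gridOf
      rw [List.map_map]
      apply List.map_congr_left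
      intro a ha
      simp only [Function.comp_apply]
      rw [List.map_map]
      apply List.map_congr_left
      intro b hb
      exact cell_final v h_ n a b (List.mem_range.mp ha) (List.mem_range.mp hb)
    rw [← hfin]
    rw [List.range_eq_range']
    have e0 : gridOf (cellAt v h_ n 0 0) n = (fun i => gridOf (cellAt v h_ n i 0) n) 0 := rfl
    rw [e0]
    rw [foldl_inv _ (fun i => gridOf (cellAt v h_ n i 0) n) n 0 ?_]
    · have : 0 + n = n := by omega
      rw [this]
    · intro k hk0 hkn
      have hk : k < n := by omega
      have estart : gridOf (cellAt v h_ n k 0) n = (fun j => gridOf (cellAt v h_ n k j) n) 0 := rfl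
      show (List.range' 0 n).foldl _ (gridOf (cellAt v h_ n k 0) n) = _
      rw [estart]
      rw [foldl_inv _ (fun j => gridOf (cellAt v h_ n k j) n) n 0 ?_]
      · have e : 0 + n = n := by omega
        rw [e]
        exact rowEnd v h_ n k
      · intro j hj0 hjn
        exact step_lemma v h_ n k j hk (by omega)

-- ===== VERDICT (by name: the statement is the Claim_ definition above) =====
theorem build_cell_walls_spec : Claim_equal_build_cell_walls := by
  intro v h_ N _ _
  exact main_eq v h_ N
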